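-- pv_equiv track=rewrite | github.com/semiuniversal/realtimeSDK | semantic_gcode/dict/gcode_commands/M119/M119.py | parse_endstops
-- ===== SOURCE A (Python) =====
-- from typing import Dict
--
-- def parse_endstops(response: str) -> Dict[str, int]:
--     out: Dict[str, int] = {}
--     for ln in response.splitlines():
--         lower = ln.lower()
--         if any(axis in lower for axis in ("x:", "y:", "z:", "u:", "v:")):
--             for axis in ("x", "y", "z", "u", "v"):
--                 if f"{axis}:" in lower:
--                     try:
--                         val = lower.split(f"{axis}:")[-1].split(',')[0].strip()
--                         out[axis.upper()] = 1 if "stopped" in val else 0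
--                     except Exception:
--                         pass
--     return out
-- ===== SOURCE B (Python) =====
-- def parse_endstops(response):
--     out = {}
--     for ln in response.splitlines():
--         lower = ln.lower()
--         found = {}
--         i = 0
--         n = len(lower)
--         # one scan: record, for every "c:" marker, the text after it up to the
--         # next comma; later occurrences overwrite earlier ones
--         while i + 1 < n:
--             if lower[i] in "xyzuv" and lower[i + 1] == ":":
--                 tail = lower[i + 2:]
--                 comma = tail.find(",")
--                 found[lower[i]] = tail if comma == -1 else tail[:comma]
--             i += 1
--         for axis in "xyzuv":
--             if axis in found:
--                 out[axis.upper()] = 1 if "stopped" in found[axis] else 0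
--     return out
-- ===== Notes on version B (the rewrite author's own statement) =====
-- stated objective: alternative
-- what changed: Replaces the nested five-axis loop with repeated substring searches and split()-chains per line by a single left-to-right character scan per line that collects the last value following each axis-letter-plus-colon marker into a per-line map, then emits the axes once in canonical order.
import Mathlib
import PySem

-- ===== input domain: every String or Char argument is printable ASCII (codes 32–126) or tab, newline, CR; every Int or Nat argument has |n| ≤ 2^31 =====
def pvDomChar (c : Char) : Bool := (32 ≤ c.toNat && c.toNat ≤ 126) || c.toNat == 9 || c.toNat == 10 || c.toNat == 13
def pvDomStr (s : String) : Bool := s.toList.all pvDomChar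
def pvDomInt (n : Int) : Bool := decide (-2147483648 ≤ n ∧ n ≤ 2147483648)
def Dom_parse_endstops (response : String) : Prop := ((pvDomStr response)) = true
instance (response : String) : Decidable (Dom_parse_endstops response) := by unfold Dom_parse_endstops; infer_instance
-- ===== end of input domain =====

-- B replaces A's nested five-axis loop of substring searches and split()-chains by a
-- single character scan per line collecting the last value after each axis marker
-- (alternative decomposition, same results).


-- ===== PORT A =====
-- f"{axis}:"  (string concatenation via the char lists; exact)
def pvMark (axis : String) : String := String.ofList (axis.toList ++ [':'])

-- body of A's inner `for axis in ("x", "y", "z", "u", "v")`; the Option chain is the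
-- try/except: `none` anywhere (never reached for these nonempty separators) = pass
def pvAxisA (lower : String) (d : PySem.Dict String Int) (axis : String) : PySem.Dict String Int :=
  if PySem.Str.isIn (pvMark axis) lower then
    match (PySem.Str.split? lower (pvMark axis)).bind (fun parts =>
          (PySem.List.pyGet? parts (-1)).bind (fun seg =>
          (PySem.Str.split? seg ",").bind (fun parts2 =>
          (PySem.List.pyGet? parts2 0).map PySem.Str.strip))) with
    | some val => d.insert (PySem.Str.upper axis) (if PySem.Str.isIn "stopped" val then 1 else 0)
    | none => d
  else d

-- body of A's `for ln in response.splitlines()`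
def pvLineA (d : PySem.Dict String Int) (ln : String) : PySem.Dict String Int :=
  let lower := PySem.Str.lower ln
  if (["x:", "y:", "z:", "u:", "v:"] : List String).any (fun axis => PySem.Str.isIn axis lower) then
    (["x", "y", "z", "u", "v"] : List String).foldl (pvAxisA lower) d
  else d

def parse_endstops (response : String) : List (String × Int) :=
  ((PySem.Str.splitlines response).foldl pvLineA PySem.Dict.empty).items

-- ===== PORT B =====
-- Source B: tail = lower[i+2:]; comma = tail.find(","); tail if comma == -1 else tail[:comma]
def pvTailVal (tail : List Char) : List Char :=
  let comma := PySem.Chars.find tail [',']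
  if comma = -1 then tail else PySem.List.slice tail none (some comma)

-- Source B's `while i + 1 < n` scan, as recursion on the suffix starting at i
def pvScanB : List Char → PySem.Dict Char (List Char) → PySem.Dict Char (List Char)
  | [], d => d
  | [_], d => d
  | a :: b :: rest, d =>
      pvScanB (b :: rest)
        (if "xyzuv".toList.contains a && (b == ':') then d.insert a (pvTailVal rest) else d)

-- body of Source B's `for axis in "xyzuv"` readout
def pvAxisB (found : PySem.Dict Char (List Char)) (d : PySem.Dict String Int) (c : Char) :
    PySem.Dict String Int :=
  match found.get? c with
  | some v => d.insert (PySem.Str.upper (String.ofList [c]))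
      (if PySem.Chars.isIn "stopped".toList v then 1 else 0)
  | none => d

-- body of Source B's `for ln in response.splitlines()`
def pvLineB (d : PySem.Dict String Int) (ln : String) : PySem.Dict String Int :=
  let lower := PySem.Str.lower ln
  let found := pvScanB lower.toList PySem.Dict.empty
  "xyzuv".toList.foldl (pvAxisB found) d

def parse_endstops_alt (response : String) : List (String × Int) :=
  ((PySem.Str.splitlines response).foldl pvLineB PySem.Dict.empty).items

-- ===== PRECONDITION & SPEC =====
def Spec_parse_endstops (response : String) (out : List (String × Int)) : Prop := out = parse_endstops_alt response
instance (response : String) (out : List (String × Int)) : Decidable (Spec_parse_endstops response out) := by unfold Spec_parse_endstops; infer_instance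

-- ===== CLAIM (what is proved, stated in full; the proofs are below) =====
def Claim_equal_parse_endstops : Prop := ∀ (response : String), Dom_parse_endstops response → Spec_parse_endstops response (parse_endstops response)

-- ===== LEMMAS AND PROOFS =====

-- the suffix of l after the LAST occurrence of the two-char pattern [c, ':'] (none if absent)
def pvAfterLast (c : Char) : List Char → Option (List Char)
  | [] => none
  | a :: rest =>
    match pvAfterLast c rest with
    | some t => some t
    | none => if a = c ∧ rest.head? = some ':' then some rest.tail else none

-- clean structural recursion computing Chars.splitOn for a nonempty separator
def pvSplit (sep : List Char) : List Char → List (List Char)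
  | [] => [[]]
  | a :: rest =>
    if sep.isPrefixOf (a :: rest) then
      [] :: pvSplit sep (List.drop (sep.length - 1) rest)
    else
      match pvSplit sep rest with
      | [] => [[]]
      | h :: t => (a :: h) :: t
  termination_by l => l.length
  decreasing_by all_goals (simp; try omega)

theorem pvSplit_ne_nil (sep l) : pvSplit sep l ≠ [] := by
  rcases l with _ | ⟨a, rest⟩
  · simp [pvSplit]
  · rw [pvSplit]
    split
    · simp
    · split <;> simp

theorem pvSplitOn_go_eq (sep : List Char) (hsep : sep ≠ []) :
    ∀ (fuel : Nat) (l cur : List Char) (acc : List (List Char)), l.length < fuel →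
      PySem.Chars.splitOn.go sep fuel l cur acc =
        acc.reverse ++ (match pvSplit sep l with
          | [] => []
          | h :: t => (cur.reverse ++ h) :: t) := by
  intro fuel l cur acc
  induction fuel, l, cur, acc using PySem.Chars.splitOn.go.induct sep with
  | case1 l cur acc =>
    intro h; omega
  | case2 t cur acc ht =>
    intro h
    rcases t with _ | t
    · exact absurd rfl ht
    · simp [PySem.Chars.splitOn.go, pvSplit]
  | case3 fuel c rest cur acc hpre ih =>
    intro h
    have hlen : sep.length ≥ 1 := by
      rcases sep with _ | _ <;> simp_all
    have hd : List.drop sep.length (c :: rest) = List.drop (sep.length - 1) rest := by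
      rcases sep with _ | ⟨s, ss⟩
      · exact absurd rfl hsep
      · simp [List.drop_succ_cons]
    have hlt : (List.drop sep.length (c :: rest)).length < fuel := by
      simp at h ⊢; omega
    rw [PySem.Chars.splitOn.go, if_pos hpre, ih hlt, pvSplit, if_pos hpre, hd]
    rcases hx : pvSplit sep (List.drop (sep.length - 1) rest) with _ | ⟨h1, t1⟩
    · exact absurd hx (pvSplit_ne_nil _ _)
    · simp
  | case4 fuel c rest cur acc hpre ih =>
    intro h
    have hlt : rest.length < fuel := by simp at h; omega
    rw [PySem.Chars.splitOn.go, if_neg hpre, ih hlt, pvSplit, if_neg hpre]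
    rcases hx : pvSplit sep rest with _ | ⟨h1, t1⟩
    · exact absurd hx (pvSplit_ne_nil _ _)
    · simp

theorem pvSplitOn_eq (sep l : List Char) (hsep : sep ≠ []) :
    PySem.Chars.splitOn l sep = pvSplit sep l := by
  rw [PySem.Chars.splitOn, pvSplitOn_go_eq sep hsep (l.length + 1) l [] [] (by omega)]
  rcases hx : pvSplit sep l with _ | ⟨h1, t1⟩
  · exact absurd hx (pvSplit_ne_nil _ _)
  · simp

theorem pvSplit_head (a : Char) (l : List Char) :
    (pvSplit [a] l).head? = some (l.takeWhile (· ≠ a)) := by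
  induction l using pvSplit.induct [a] with
  | case1 => simp [pvSplit]
  | case2 c rest hpre ih =>
    have hca : a = c := by simpa [List.isPrefixOf] using hpre
    subst hca
    rw [pvSplit, if_pos hpre]
    rw [List.takeWhile_cons]
    simp only [List.head?_cons]
    norm_num
  | case3 c rest hpre hnil ih => exact absurd hnil (pvSplit_ne_nil _ _)
  | case4 c rest hpre h1 t1 hx ih =>
    have hca : ¬ (c = a) := by
      have : ¬ (a = c) := by simpa [List.isPrefixOf] using hpre
      exact fun h => this h.symm
    rw [pvSplit, if_neg hpre, hx]
    rw [hx] at ih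
    simp at ih
    rw [List.takeWhile_cons]
    simp [hca, ih]

-- one-step unfolding of pvAfterLast on a cons (structural, rfl)
theorem pvAfterLast_cons (c a : Char) (rest : List Char) :
    pvAfterLast c (a :: rest) =
      match pvAfterLast c rest with
      | some t => some t
      | none => if a = c ∧ rest.head? = some ':' then some rest.tail else none := rfl

theorem pvAfterLast_cons_some (c a : Char) (rest t : List Char)
    (hr : pvAfterLast c rest = some t) : pvAfterLast c (a :: rest) = some t := by
  rw [pvAfterLast_cons, hr]

theorem pvAfterLast_cons_none_pos (c a : Char) (rest : List Char)
    (hr : pvAfterLast c rest = none) (hg : a = c ∧ rest.head? = some ':') :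
    pvAfterLast c (a :: rest) = some rest.tail := by
  rw [pvAfterLast_cons, hr]; simp [hg]

theorem pvAfterLast_cons_none_neg (c a : Char) (rest : List Char)
    (hr : pvAfterLast c rest = none) (hg : ¬ (a = c ∧ rest.head? = some ':')) :
    pvAfterLast c (a :: rest) = none := by
  rw [pvAfterLast_cons, hr]; simp [hg]

-- the two-char pattern as a prefix, elementwise
theorem pvPre2 (c a : Char) (rest : List Char) :
    [c, ':'].isPrefixOf (a :: rest) = true ↔ a = c ∧ rest.head? = some ':' := by
  rcases rest with _ | ⟨b, r⟩ <;> simp [List.isPrefixOf, @eq_comm Char]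

theorem pvAfterLast_colon (c : Char) (hc : c ≠ ':') (r : List Char) :
    pvAfterLast c (':' :: r) = pvAfterLast c r := by
  cases h : pvAfterLast c r with
  | some t => exact pvAfterLast_cons_some c ':' r t h
  | none =>
    rw [pvAfterLast_cons_none_neg c ':' r h (fun hg => absurd hg.1.symm hc)]

theorem pvAfterLast_none_split (c : Char) (l : List Char)
    (h : pvAfterLast c l = none) : pvSplit [c, ':'] l = [l] := by
  induction l using pvAfterLast.induct c with
  | case1 => simp [pvSplit]
  | case2 a rest t hsome ih =>
    rw [pvAfterLast_cons_some c a rest t hsome] at h; exact absurd h (by simp)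
  | case3 a rest hnone hg ih =>
    rw [pvAfterLast_cons_none_pos c a rest hnone hg] at h; exact absurd h (by simp)
  | case4 a rest hnone hg ih =>
    have hpre : ¬ [c, ':'].isPrefixOf (a :: rest) = true := by
      rw [pvPre2]; exact hg
    rw [pvSplit, if_neg hpre, ih hnone]

theorem pvAfterLast_some_len (c : Char) (l t : List Char)
    (h : pvAfterLast c l = some t) : 2 ≤ (pvSplit [c, ':'] l).length := by
  induction l using pvSplit.induct [c, ':'] with
  | case1 =>
    rw [show pvAfterLast c [] = none from rfl] at h
    cases h
  | case2 a rest hpre ih =>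
    rw [pvSplit, if_pos hpre]
    rcases hx : pvSplit [c, ':'] (List.drop ([c, ':'].length - 1) rest) with _ | ⟨y, ys⟩
    · exact absurd hx (pvSplit_ne_nil _ _)
    · simp
  | case3 a rest hpre hnil ih => exact absurd hnil (pvSplit_ne_nil _ _)
  | case4 a rest hpre h1 t1 hx ih =>
    have hg : ¬ (a = c ∧ rest.head? = some ':') := by
      rw [← pvPre2]; exact hpre
    have hrest : pvAfterLast c rest = some t := by
      cases hr : pvAfterLast c rest with
      | some t' =>
        rw [pvAfterLast_cons_some c a rest t' hr] at h
        exact h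
      | none =>
        rw [pvAfterLast_cons_none_neg c a rest hr hg] at h; exact absurd h (by simp)
    have := ih hrest
    rw [hx] at this
    rw [pvSplit, if_neg hpre, hx]
    simpa using this

theorem pvAfterLast_some_last (c : Char) (hc : c ≠ ':') (l : List Char) :
    ∀ t, pvAfterLast c l = some t → (pvSplit [c, ':'] l).getLast? = some t := by
  induction l using pvSplit.induct [c, ':'] with
  | case1 =>
    intro t h
    rw [show pvAfterLast c [] = none from rfl] at h
    cases h
  | case2 a rest hpre ih =>
    intro t h
    obtain ⟨hac, hhd⟩ := (pvPre2 c a rest).mp hpre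
    subst hac
    rcases rest with _ | ⟨b, r2⟩
    · simp at hhd
    · obtain rfl : b = ':' := by simpa using hhd
      have hdrop : List.drop ([a, ':'].length - 1) (':' :: r2) = r2 := by simp
      rw [pvSplit, if_pos hpre, hdrop]
      rw [hdrop] at ih
      have hAr := pvAfterLast_colon a hc r2
      cases hr2 : pvAfterLast a r2 with
      | some t' =>
        have hcol : pvAfterLast a (':' :: r2) = some t' := hAr.trans hr2
        have ht : t' = t := by
          rw [pvAfterLast_cons_some a a (':' :: r2) t' hcol] at h
          exact Option.some_injective _ h
        have hlast := ih t' hr2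
        rcases hy : pvSplit [a, ':'] r2 with _ | ⟨y, ys⟩
        · exact absurd hy (pvSplit_ne_nil _ _)
        · rw [hy] at hlast
          rw [List.getLast?_cons_cons, hlast, ht]
      | none =>
        have hcol : pvAfterLast a (':' :: r2) = none := hAr.trans hr2
        have ht : r2 = t := by
          rw [pvAfterLast_cons_none_pos a a (':' :: r2) hcol (by simp)] at h
          simpa using h
        rw [pvAfterLast_none_split a r2 hr2]
        simp [ht]
  | case3 a rest hpre hnil ih => exact absurd hnil (pvSplit_ne_nil _ _)
  | case4 a rest hpre h1 t1 hx ih =>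
    intro t h
    have hg : ¬ (a = c ∧ rest.head? = some ':') := by
      rw [← pvPre2]; exact hpre
    have hrest : pvAfterLast c rest = some t := by
      cases hr : pvAfterLast c rest with
      | some t' =>
        rw [pvAfterLast_cons_some c a rest t' hr] at h
        exact h
      | none =>
        rw [pvAfterLast_cons_none_neg c a rest hr hg] at h; exact absurd h (by simp)
    have hlast := ih t hrest
    have hlen := pvAfterLast_some_len c rest t hrest
    rw [hx] at hlast hlen
    rcases t1 with _ | ⟨y, ys⟩
    · simp at hlen
    · rw [pvSplit, if_neg hpre, hx]
      rw [List.getLast?_cons_cons] at hlast ⊢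
      exact hlast

theorem pvAfterLast_none_iff (c : Char) (l : List Char) :
    pvAfterLast c l = none ↔ ¬ ([c, ':'] <:+: l) := by
  induction l with
  | nil => rw [show pvAfterLast c [] = none from rfl]; simp
  | cons a rest ih =>
    rw [List.infix_cons_iff]
    constructor
    · intro h
      cases hr : pvAfterLast c rest with
      | some t' => rw [pvAfterLast_cons_some c a rest t' hr] at h; simp at h
      | none =>
        have hg : ¬ (a = c ∧ rest.head? = some ':') := by
          intro hg
          rw [pvAfterLast_cons_none_pos c a rest hr hg] at h; simp at h
        rintro (hp | hi)
        · exact hg ((pvPre2 c a rest).mp (List.isPrefixOf_iff_prefix.mpr hp))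
        · exact (ih.mp hr) hi
    · intro h
      have hnp : ¬ ([c, ':'] <+: a :: rest) := fun hp => h (Or.inl hp)
      have hni : ¬ ([c, ':'] <:+: rest) := fun hi => h (Or.inr hi)
      have hr : pvAfterLast c rest = none := ih.mpr hni
      have hg : ¬ (a = c ∧ rest.head? = some ':') := by
        intro hg
        exact hnp (List.isPrefixOf_iff_prefix.mp ((pvPre2 c a rest).mpr hg))
      exact pvAfterLast_cons_none_neg c a rest hr hg

-- a singleton pattern is a prefix iff it is the head
theorem pvSingPrefix (t : List Char) (c : Char) : [c] <+: t ↔ t.head? = some c := by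
  rcases t with _ | ⟨a, r⟩ <;> simp [List.cons_prefix_cons, @eq_comm Char]

theorem pvTakeEq : ∀ (l : List Char) (k : Nat), l[k]? = some ',' →
    (∀ i, i < k → l[i]? ≠ some ',') → l.take k = l.takeWhile (· ≠ ',') := by
  intro l
  induction l with
  | nil => intro k h _; simp at h
  | cons a r ih =>
    intro k hk hmin
    cases k with
    | zero => simp at hk; simp [hk]
    | succ k =>
      have ha : a ≠ ',' := by
        have := hmin 0 (by omega); simpa using this
      simp only [List.take_succ_cons, List.takeWhile_cons]
      simp [ha, ih k (by simpa using hk) (fun i hi => by simpa using hmin (i + 1) (by omega))]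

-- tail.find(",")-based cut = takeWhile (· ≠ ',')
theorem pvTailVal_eq (t : List Char) : pvTailVal t = t.takeWhile (· ≠ ',') := by
  unfold pvTailVal
  by_cases h : PySem.Chars.find t [','] = -1
  · rw [if_pos h]
    have hnin : ',' ∉ t := by
      have := (PySem.Chars.find_eq_neg_one_iff t [',']).mp h
      rwa [List.singleton_infix_iff] at this
    rw [List.takeWhile_eq_self_iff.mpr]
    intro x hx
    simp [ne_of_mem_of_not_mem hx hnin]
  · rw [if_neg h]
    have hge : 0 ≤ PySem.Chars.find t [','] := by
      have := PySem.Chars.neg_one_le_find t [',']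
      omega
    obtain ⟨hpre, hmin⟩ := PySem.Chars.find_spec hge
    rw [PySem.List.slice_to t hge]
    apply pvTakeEq
    · have := (pvSingPrefix _ ',').mp hpre
      rwa [List.head?_drop] at this
    · intro i hi hcon
      exact hmin i hi ((pvSingPrefix _ ',').mpr (by rwa [List.head?_drop]))

-- what the scan's map holds for an axis letter
theorem pvScanB_get (c : Char) (hc : c ∈ "xyzuv".toList) :
    ∀ (l : List Char) (d : PySem.Dict Char (List Char)),
      (pvScanB l d).get? c =
        match pvAfterLast c l with
        | some t => some (pvTailVal t)
        | none => d.get? c := by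
  intro l d
  induction l, d using pvScanB.induct with
  | case1 d => rfl
  | case2 x d =>
    have h1 : pvAfterLast c [x] = none := by
      rw [pvAfterLast_cons, show pvAfterLast c [] = none from rfl]
      simp
    rw [show pvScanB [x] d = d from rfl, h1]
  | case3 a b rest d ih =>
    rw [show pvScanB (a :: b :: rest) d =
          pvScanB (b :: rest)
            (if "xyzuv".toList.contains a && (b == ':') then d.insert a (pvTailVal rest) else d)
        from rfl, ih]
    cases hr : pvAfterLast c (b :: rest) with
    | some t => rw [pvAfterLast_cons_some c a (b :: rest) t hr]
    | none =>
      by_cases hg : a = c ∧ (b :: rest).head? = some ':'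
      · rw [pvAfterLast_cons_none_pos c a (b :: rest) hr hg]
        obtain ⟨rfl, hb⟩ := hg
        have hb' : b = ':' := by simpa using hb
        rw [if_pos (by simp [hb']; simpa using hc)]
        simp [PySem.Dict.get?_insert_self]
      · rw [pvAfterLast_cons_none_neg c a (b :: rest) hr hg]
        by_cases hguard : ("xyzuv".toList.contains a && (b == ':')) = true
        · rw [if_pos hguard]
          have hac : c ≠ a := by
            intro hca
            have hb : b = ':' := by
              have := hguard
              simp at this
              exact this.2
            exact hg ⟨hca.symm, by simp [hb]⟩
          rw [PySem.Dict.get?_insert_of_ne d (pvTailVal rest) hac]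
        · rw [if_neg hguard]

-- an occurrence of "stopped" survives dropWhile isspace (its head is not whitespace)
theorem pvInfix_dropWhile (c0 : Char) (hc0 : PySem.Chars.isspace c0 = false)
    (st v : List Char) (h : (c0 :: st) <:+: v) :
    (c0 :: st) <:+: List.dropWhile PySem.Chars.isspace v := by
  obtain ⟨p, s, rfl⟩ := h
  rw [List.append_assoc, List.dropWhile_append]
  by_cases he : (List.dropWhile PySem.Chars.isspace p).isEmpty = true
  · rw [if_pos he]
    rw [show (c0 :: st ++ s) = c0 :: (st ++ s) from rfl, List.dropWhile_cons]
    simp only [hc0]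
    exact ⟨[], s, by simp⟩
  · rw [if_neg he]
    exact ⟨List.dropWhile PySem.Chars.isspace p, s, by simp⟩

-- "stopped" survives strip in both directions (its end chars are not whitespace)
theorem pvStrip_stopped (v : List Char) :
    PySem.Chars.isIn "stopped".toList (PySem.Chars.strip v) =
      PySem.Chars.isIn "stopped".toList v := by
  have key : "stopped".toList <:+: PySem.Chars.strip v ↔ "stopped".toList <:+: v := by
    constructor
    · intro h
      have h1 : PySem.Chars.strip v <:+: v := by
        have hl : PySem.Chars.lstrip v <:+ v := List.dropWhile_suffix _
        have hr : PySem.Chars.rstrip (PySem.Chars.lstrip v) <+: PySem.Chars.lstrip v := by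
          unfold PySem.Chars.rstrip
          rw [← List.reverse_suffix]
          simpa using List.dropWhile_suffix (l := (PySem.Chars.lstrip v).reverse)
            (p := PySem.Chars.isspace)
        exact (hr.isInfix).trans hl.isInfix
      exact h.trans h1
    · intro h
      have h1 : "stopped".toList <:+: PySem.Chars.lstrip v :=
        pvInfix_dropWhile 's' (by decide) _ v h
      have h2 : "stopped".toList.reverse <:+: (PySem.Chars.lstrip v).reverse :=
        List.reverse_infix.mpr h1
      have h3 : "stopped".toList.reverse <:+:
          List.dropWhile PySem.Chars.isspace (PySem.Chars.lstrip v).reverse := by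
        have : "stopped".toList.reverse = 'd' :: ['e', 'p', 'p', 'o', 't', 's'] := by decide
        rw [this] at h2 ⊢
        exact pvInfix_dropWhile 'd' (by decide) _ _ h2
      have h4 := List.reverse_infix.mpr h3
      simpa [PySem.Chars.strip, PySem.Chars.rstrip] using h4
  rw [Bool.eq_iff_iff, PySem.Chars.isIn_iff_infix, PySem.Chars.isIn_iff_infix]
  exact key

theorem pyGet_neg_one {α : Type} (xs : List α) (h : xs ≠ []) :
    PySem.List.pyGet? xs (-1) = xs.getLast? := by
  have hn : 1 ≤ xs.length := by
    rcases xs with _ | _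
    · exact absurd rfl h
    · simp
  simp only [PySem.List.pyGet?, PySem.List.pyIdx?]
  rw [if_neg (by omega), if_pos (by exact_mod_cast (by omega : -(xs.length : Int) ≤ -1))]
  simp [List.getLast?_eq_getElem?]

theorem pyGet_zero {α : Type} (xs : List α) (h : xs ≠ []) :
    PySem.List.pyGet? xs 0 = xs.head? := by
  have hn : 1 ≤ xs.length := by
    rcases xs with _ | _
    · exact absurd rfl h
    · simp
  simp only [PySem.List.pyGet?, PySem.List.pyIdx?]
  rw [if_pos (by omega), if_pos (by exact_mod_cast (by omega : (0 : Int) < xs.length))]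
  simp [List.head?_eq_getElem?]

-- per-axis agreement
theorem pvAxis_eq (c : Char) (ax : String) (hax : ax.toList = [c])
    (hmem : c ∈ "xyzuv".toList) (hc : c ≠ ':')
    (lower : String) (d : PySem.Dict String Int) :
    pvAxisA lower d ax = pvAxisB (pvScanB lower.toList PySem.Dict.empty) d c := by
  have hmark : (pvMark ax).toList = [c, ':'] := by
    simp [pvMark, hax]
  have hisin : PySem.Str.isIn (pvMark ax) lower =
      PySem.Chars.isIn [c, ':'] lower.toList := by
    rw [PySem.Str.isIn, hmark]
  unfold pvAxisA pvAxisB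
  rw [pvScanB_get c hmem lower.toList PySem.Dict.empty]
  cases hA : pvAfterLast c lower.toList with
  | none =>
    have hnoin : PySem.Str.isIn (pvMark ax) lower = false := by
      rw [hisin]
      rw [PySem.Chars.isIn_eq_false_iff]
      exact (pvAfterLast_none_iff c lower.toList).mp hA
    rw [if_neg (by simp [show PySem.Chars.isIn (pvMark ax).toList lower.toList = false from hnoin]),
      PySem.Dict.get?_empty]
  | some t =>
    have hin : PySem.Str.isIn (pvMark ax) lower = true := by
      rw [hisin, PySem.Chars.isIn_iff_infix]
      by_contra hni
      rw [← pvAfterLast_none_iff c lower.toList] at hni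
      rw [hA] at hni
      cases hni
    rw [if_pos hin]
    have hsplit1 : PySem.Str.split? lower (pvMark ax) =
        some ((pvSplit [c, ':'] lower.toList).map String.ofList) := by
      rw [PySem.Str.split?, PySem.Chars.split?, hmark]
      simp [pvSplitOn_eq [c, ':'] lower.toList (by simp)]
    rw [hsplit1]
    rw [Option.bind_some]
    rw [pyGet_neg_one _ (by simp [pvSplit_ne_nil])]
    rw [List.getLast?_map, pvAfterLast_some_last c hc lower.toList t hA]
    rw [Option.map_some, Option.bind_some]
    have hsplit2 : PySem.Str.split? (String.ofList t) "," =
        some ((pvSplit [','] t).map String.ofList) := by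
      rw [PySem.Str.split?, PySem.Chars.split?]
      simp [pvSplitOn_eq [','] t (by simp), show ",".toList = [','] from rfl]
    rw [hsplit2, Option.bind_some]
    rw [pyGet_zero _ (by simp [pvSplit_ne_nil])]
    rw [List.head?_map, pvSplit_head ',' t]
    rw [Option.map_some, Option.map_some]
    have hkey : PySem.Str.upper ax = PySem.Str.upper (String.ofList [c]) := by
      rw [← hax, String.ofList_toList]
    have hval : PySem.Str.isIn "stopped"
          (PySem.Str.strip (String.ofList (List.takeWhile (fun x => decide (x ≠ ',')) t))) =
        PySem.Chars.isIn "stopped".toList (pvTailVal t) := by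
      simp only [PySem.Str.isIn, PySem.Str.toList_strip, String.toList_ofList, pvTailVal_eq]
      exact pvStrip_stopped _
    show d.insert (PySem.Str.upper ax)
        (if PySem.Str.isIn "stopped"
            (PySem.Str.strip (String.ofList (List.takeWhile (fun x => decide (x ≠ ',')) t))) = true
          then 1 else 0) =
      d.insert (PySem.Str.upper (String.ofList [c]))
        (if PySem.Chars.isIn "stopped".toList (pvTailVal t) = true then 1 else 0)
    rw [hkey, hval]

-- a scan miss for an axis whose marker is absent from the line
theorem pvAxisB_noop (c : Char) (hmem : c ∈ "xyzuv".toList) (lower : String)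
    (h : PySem.Chars.isIn [c, ':'] lower.toList = false) (d : PySem.Dict String Int) :
    pvAxisB (pvScanB lower.toList PySem.Dict.empty) d c = d := by
  unfold pvAxisB
  rw [pvScanB_get c hmem lower.toList PySem.Dict.empty,
    (pvAfterLast_none_iff c lower.toList).mpr (PySem.Chars.isIn_eq_false_iff _ _ |>.mp h),
    PySem.Dict.get?_empty]

-- per-line agreement
theorem pvLine_eq (d : PySem.Dict String Int) (ln : String) :
    pvLineA d ln = pvLineB d ln := by
  unfold pvLineA pvLineB
  set lower := PySem.Str.lower ln with hlow
  have hEq : ∀ d : PySem.Dict String Int,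
      (["x", "y", "z", "u", "v"] : List String).foldl (pvAxisA lower) d =
        "xyzuv".toList.foldl (pvAxisB (pvScanB lower.toList PySem.Dict.empty)) d := by
    intro d
    rw [show "xyzuv".toList = ['x', 'y', 'z', 'u', 'v'] from rfl]
    simp only [List.foldl_cons, List.foldl_nil]
    rw [pvAxis_eq 'x' "x" rfl (by decide) (by decide) lower,
      pvAxis_eq 'y' "y" rfl (by decide) (by decide) lower,
      pvAxis_eq 'z' "z" rfl (by decide) (by decide) lower,
      pvAxis_eq 'u' "u" rfl (by decide) (by decide) lower,
      pvAxis_eq 'v' "v" rfl (by decide) (by decide) lower]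
  by_cases hg : (["x:", "y:", "z:", "u:", "v:"] : List String).any
      (fun axis => PySem.Str.isIn axis lower) = true
  · rw [if_pos hg, hEq]
  · rw [if_neg hg]
    simp only [List.any_cons, List.any_nil, Bool.or_eq_true, not_or] at hg
    have hx := Bool.eq_false_iff.mpr hg.1
    have hy := Bool.eq_false_iff.mpr hg.2.1
    have hz := Bool.eq_false_iff.mpr hg.2.2.1
    have hu := Bool.eq_false_iff.mpr hg.2.2.2.1
    have hv := Bool.eq_false_iff.mpr hg.2.2.2.2.1
    rw [show "xyzuv".toList = ['x', 'y', 'z', 'u', 'v'] from rfl]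
    simp only [List.foldl_cons, List.foldl_nil]
    rw [pvAxisB_noop 'x' (by decide) lower hx,
      pvAxisB_noop 'y' (by decide) lower hy,
      pvAxisB_noop 'z' (by decide) lower hz,
      pvAxisB_noop 'u' (by decide) lower hu,
      pvAxisB_noop 'v' (by decide) lower hv]

-- ===== VERDICT (by name: the statement is the Claim_ definition above) =====
theorem parse_endstops_spec : Claim_equal_parse_endstops := by
  intro response _
  unfold Spec_parse_endstops parse_endstops parse_endstops_alt
  rw [funext fun d => funext fun ln => pvLine_eq d ln]
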